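-- pv_equiv track=rewrite | github.com/coding-armadillo/advent-of-code | src/2021/day16_part1.py | decode_literal
-- ===== SOURCE A (Python) =====
-- def decode_literal(b):
--     value = ""
--
--     while b:
--         seg = b[:5]
--         value += seg[-4:]
--         b = b[5:]
--         if seg[0] == "0":
--             break
--
--     return value, b
-- ===== SOURCE B (Python) =====
-- def decode_literal(b):
--     n = len(b)
--     parts = []
--     i = 0
--     while i < n:
--         seg = b[i:i + 5]
--         parts.append(seg[-4:])
--         i += 5
--         if seg[0] == "0":
--             break
--     return "".join(parts), b[i:]
-- ===== Notes on version B (the rewrite author's own statement) =====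
-- stated objective: faster
-- what changed: Replaces repeated string reslicing (b = b[5:]) and quadratic string concatenation (value += ...) with a single index pointer over the original string and a list of chunks joined once at the end.
import Mathlib
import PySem

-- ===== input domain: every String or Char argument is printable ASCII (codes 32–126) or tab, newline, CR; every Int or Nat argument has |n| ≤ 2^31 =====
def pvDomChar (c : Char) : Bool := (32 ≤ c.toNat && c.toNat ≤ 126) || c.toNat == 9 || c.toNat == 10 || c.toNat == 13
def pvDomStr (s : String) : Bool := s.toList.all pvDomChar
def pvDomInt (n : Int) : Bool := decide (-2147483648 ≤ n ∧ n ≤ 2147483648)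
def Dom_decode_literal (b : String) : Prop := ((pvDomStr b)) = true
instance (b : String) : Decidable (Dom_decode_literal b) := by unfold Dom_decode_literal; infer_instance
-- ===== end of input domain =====

-- B replaces A's repeated reslicing of b and quadratic string concatenation with an
-- index pointer over the original string and a chunk list joined once (objective: faster).

-- ===== PORT A =====
-- while b: seg = b[:5]; value += seg[-4:]; b = b[5:]; if seg[0] == "0": break
def decodeLiteralGoA (b value : List Char) : List Char × List Char :=
  if hb : b = [] then (value, b)
  else
    let seg := PySem.List.slice b none (some 5)
    let value' := value ++ PySem.List.slice seg (some (-4)) none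
    let b' := PySem.List.slice b (some 5) none
    if PySem.List.pyGet? seg 0 = some '0' then (value', b')
    else decodeLiteralGoA b' value'
termination_by b.length
decreasing_by
  rw [PySem.List.slice_from b (by omega : (0:Int) ≤ 5)]
  cases b with
  | nil => exact absurd rfl hb
  | cons x xs => simp [List.length_drop]

def decode_literal (b : String) : String × String :=
  let r := decodeLiteralGoA b.toList []
  (String.ofList r.1, String.ofList r.2)

-- ===== PORT B =====
-- index loop: while i < n: seg = b[i:i+5]; parts.append(seg[-4:]); i += 5; if seg[0]=="0": break
def decodeLiteralGoB (b : List Char) (n i : Nat) (parts : List (List Char)) :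
    List (List Char) × Nat :=
  if i < n then
    let seg := PySem.List.slice b (some (i : Int)) (some ((i : Int) + 5))
    let parts' := parts ++ [PySem.List.slice seg (some (-4)) none]
    let i' := i + 5
    if PySem.List.pyGet? seg 0 = some '0' then (parts', i')
    else decodeLiteralGoB b n i' parts'
  else (parts, i)
termination_by n - i

def decode_literal_alt (b : String) : String × String :=
  let r := decodeLiteralGoB b.toList b.toList.length 0 []
  (String.ofList r.1.flatten, String.ofList (PySem.List.slice b.toList (some (r.2 : Int)) none))

-- ===== PRECONDITION & SPEC =====
def Spec_decode_literal (b : String) (out : String × String) : Prop := out = decode_literal_alt b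
instance (b : String) (out : String × String) : Decidable (Spec_decode_literal b out) := by unfold Spec_decode_literal; infer_instance

-- ===== CLAIM (what is proved, stated in full; the proofs are below) =====
def Claim_equal_decode_literal : Prop := ∀ (b : String), Dom_decode_literal b → Spec_decode_literal b (decode_literal b)

-- ===== LEMMAS AND PROOFS =====

lemma decode_literal_main (b : List Char) (i : Nat) (value : List Char)
    (parts : List (List Char)) (h : value = parts.flatten) :
    (decodeLiteralGoA (b.drop i) value).1 = (decodeLiteralGoB b b.length i parts).1.flatten ∧
    (decodeLiteralGoA (b.drop i) value).2 = b.drop (decodeLiteralGoB b b.length i parts).2 := by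
  by_cases hi : i < b.length
  · have hne : b.drop i ≠ [] := by
      intro hnil
      have := congrArg List.length hnil
      simp at this
      omega
    have h5 : (5:Int).toNat = 5 := rfl
    have hsegA : PySem.List.slice (b.drop i) none (some 5) = (b.drop i).take 5 := by
      rw [PySem.List.slice_to (b.drop i) (by omega : (0:Int) ≤ 5), h5]
    have hsegB : PySem.List.slice b (some (i : Int)) (some ((i : Int) + 5)) = (b.drop i).take 5 := by
      rw [PySem.List.slice_toNat b (by omega) (by omega)]
      congr 1
      omega
    have hdrop : PySem.List.slice (b.drop i) (some 5) none = b.drop (i + 5) := by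
      rw [PySem.List.slice_from (b.drop i) (by omega : (0:Int) ≤ 5)]
      rw [List.drop_drop, h5]
    rw [decodeLiteralGoA, decodeLiteralGoB]
    simp only [hne, hi, if_true, dif_neg, hsegA, hsegB, hdrop, not_false_iff]
    by_cases hc : PySem.List.pyGet? ((b.drop i).take 5) 0 = some '0'
    · simp only [hc, if_true]
      exact ⟨by simp [h], trivial⟩
    · simp only [hc, if_false]
      exact decode_literal_main b (i + 5) (value ++ PySem.List.slice ((b.drop i).take 5) (some (-4)) none)
        (parts ++ [PySem.List.slice ((b.drop i).take 5) (some (-4)) none]) (by simp [h])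
  · have hnil : b.drop i = [] := by
      apply List.drop_eq_nil_of_le
      omega
    rw [decodeLiteralGoA, decodeLiteralGoB]
    simp only [hnil, hi, if_false, dif_pos]
    exact ⟨h, trivial⟩
termination_by b.length - i
decreasing_by omega

theorem decode_literal_spec_aux (b : String) :
    decode_literal b = decode_literal_alt b := by
  unfold decode_literal decode_literal_alt
  have h := decode_literal_main b.toList 0 [] [] rfl
  simp only [List.drop_zero] at h
  have h2 : PySem.List.slice b.toList (some (((decodeLiteralGoB b.toList b.toList.length 0 []).2 : Nat) : Int)) none
      = b.toList.drop (decodeLiteralGoB b.toList b.toList.length 0 []).2 := by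
    rw [PySem.List.slice_from _ (by omega)]
    simp
  simp only [h.1, h.2, h2]

-- ===== VERDICT (by name: the statement is the Claim_ definition above) =====
theorem decode_literal_spec : Claim_equal_decode_literal := by
  intro b _
  exact decode_literal_spec_aux b
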